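-- pv_equiv track=rewrite | github.com/salaxieb/perlin_noise | perlin_noise/tools.py | hasher
-- ===== SOURCE A (Python) =====
-- from typing import Generator, List, Tuple, Union
--
-- def dot(
--     vec1: Union[List, Tuple],
--     vec2: Union[List, Tuple],
-- ) -> Union[float, int]:
--     """Two vectors dot product.
--
--     Parameters:
--         vec1: List[float] - first vector
--         vec2: List[float] - second vector
--
--     Returns:
--         Dot product of 2 vectors
--
--     Raises:
--         ValueError: if length not equal
--     """
--     if len(vec1) != len(vec2):
--         raise ValueError('lengths of two vectors are not equal')
--     return sum([val1 * val2 for val1, val2 in zip(vec1, vec2)])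
--
-- def hasher(coors: Tuple[int]) -> int:
--     """Hashes coordinates to integer number and use obtained number as seed.
--
--     Parameters:
--         coors: List[int] - array of coordinates
--
--     Returns:
--         hash of coordinates in integer
--     """
--     return max(
--         1,
--         int(abs(
--             dot(
--                 [10 ** coordinate for coordinate in range(len(coors))],
--                 coors,
--                 ) + 1,
--         )),
--     )
-- ===== SOURCE B (Python) =====
-- def hasher(coors):
--     """Hashes coordinates to integer number and use obtained number as seed."""
--     acc = 0
--     for c in reversed(coors):
--         acc = acc * 10 + c
--     return max(1, abs(acc + 1))
-- ===== Notes on version B (the rewrite author's own statement) =====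
-- stated objective: faster
-- what changed: Replaces the powers-of-ten vector + zip dot product with Horner's method: a single reverse pass acc = acc*10 + c, never materialising the powers list nor recomputing 10**i.
import Mathlib
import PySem

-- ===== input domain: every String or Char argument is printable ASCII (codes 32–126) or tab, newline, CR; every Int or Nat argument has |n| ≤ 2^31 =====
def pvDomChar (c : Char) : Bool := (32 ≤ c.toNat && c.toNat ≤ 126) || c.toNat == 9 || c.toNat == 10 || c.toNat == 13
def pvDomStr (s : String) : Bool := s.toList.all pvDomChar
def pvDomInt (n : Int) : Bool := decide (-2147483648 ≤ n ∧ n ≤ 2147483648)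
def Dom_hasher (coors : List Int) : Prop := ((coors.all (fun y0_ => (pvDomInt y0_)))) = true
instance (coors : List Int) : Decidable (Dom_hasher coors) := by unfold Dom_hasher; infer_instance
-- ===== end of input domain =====

-- B replaces A's powers-of-ten vector + zip dot product with a single Horner pass (acc = acc*10 + c over reversed input); objective: simpler.


-- ===== PORT A =====
-- A-side helper: 'dot' raises ValueError on unequal lengths -> none (unreachable from hasher)
def dotA (vec1 vec2 : List Int) : Option Int :=
  if vec1.length ≠ vec2.length then none
  else some (((vec1.zip vec2).map (fun p => p.1 * p.2)).sum)

def hasher (coors : List Int) : Int :=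
  match dotA ((List.range coors.length).map (fun i => (10:Int) ^ i)) coors with
  | none => 0   -- unreachable: the two lists always have equal length
  | some s => max 1 |s + 1|

-- ===== PORT B =====
def hasher_alt (coors : List Int) : Int :=
  max 1 |coors.reverse.foldl (fun acc c => acc * 10 + c) 0 + 1|

-- ===== PRECONDITION & SPEC =====
def Spec_hasher (coors : List Int) (out : Int) : Prop := out = hasher_alt coors
instance (coors : List Int) (out : Int) : Decidable (Spec_hasher coors out) := by unfold Spec_hasher; infer_instance

-- ===== CLAIM (what is proved, stated in full; the proofs are below) =====
def Claim_equal_hasher : Prop := ∀ (coors : List Int), Dom_hasher coors → Spec_hasher coors (hasher coors)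

-- ===== LEMMAS AND PROOFS =====

-- ===== VERDICT (by name: the statement is the Claim_ definition above) =====
lemma horner_aux (l : List Int) (k : Int) :
    (List.map (fun p => p.1 * p.2) ((List.map (fun i => k * (10:Int) ^ i) (List.range l.length)).zip l)).sum
      = k * List.foldr (fun x y => y * 10 + x) (0:Int) l := by
  induction l generalizing k with
  | nil => simp
  | cons c t ih =>
    rw [List.length_cons, List.range_succ_eq_map, List.map_cons, List.map_map,
      List.zip_cons_cons, List.map_cons, List.sum_cons, List.foldr_cons]
    have h : (List.map ((fun i => k * (10:Int) ^ i) ∘ Nat.succ) (List.range t.length))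
        = List.map (fun i => (k * 10) * (10:Int) ^ i) (List.range t.length) := by
      apply List.map_congr_left; intro a _; simp [Function.comp, pow_succ]; ring
    rw [h, ih (k * 10)]; ring

lemma horner_eq_dot (l : List Int) :
    (List.map (fun p => p.1 * p.2) ((List.map (fun i => (10:Int) ^ i) (List.range l.length)).zip l)).sum
      = List.foldr (fun x y => y * 10 + x) (0:Int) l := by
  have := horner_aux l 1
  simpa using this

theorem hasher_spec : Claim_equal_hasher := by
  intro coors _
  unfold Spec_hasher hasher hasher_alt dotA
  simp only [List.foldl_reverse]
  simp [horner_eq_dot]
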